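-- pv_equiv track=rewrite | github.com/GregoryMorse/sudoku | sudoku.py | get_mutex_groups_min_dependent
-- ===== SOURCE A (Python) =====
-- def get_mutex_groups_min_dependent(groups): #this is a graph problem...
--   groupcand = [g.copy() for g in groups]
--   #must first define a correct dependency ordering where dependents immediately go after but requires topoligical sorting
--   for i, g in enumerate(groupcand): #must enumerate in dependency order...
--     dependents = []
--     for p in g:
--       forwards = []
--       for j in range(i+1, len(groupcand)):
--         if p in groupcand[j]:
--           forwards.append(j-i) #using relative offset for recursion
--           groupcand[j].remove(p)
--       dependents.append((p, forwards))
--     groupcand[i] = dependents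
--   return groupcand
-- ===== SOURCE B (Python) =====
-- # Counting reformulation: an occurrence of p (its k-th within its group) yields an
-- # entry iff k exceeds the running max count of p over earlier groups, and its
-- # forwards are the later groups holding at least k copies of p; no mutation/removal.
-- def _counter(g):
--     c = {}
--     for p in g:
--         c[p] = c.get(p, 0) + 1
--     return c
--
-- def _go(pref, groups, counts):
--     if not groups:
--         return []
--     g, c, later = groups[0], counts[0], counts[1:]
--     entries = []
--     seen = {}
--     for p in g:
--         k = seen.get(p, 0) + 1
--         seen[p] = k
--         if k > pref.get(p, 0):
--             entries.append((p, [d + 1 for d, cj in enumerate(later) if cj.get(p, 0) >= k]))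
--     for p in g:
--         if c[p] > pref.get(p, 0):
--             pref[p] = c[p]
--     return [entries] + _go(pref, groups[1:], later)
--
-- def get_mutex_groups_min_dependent(groups):
--     return _go({}, groups, [_counter(g) for g in groups])
-- ===== Notes on version B (the rewrite author's own statement) =====
-- stated objective: faster
-- what changed: A destructively removes each placed element from all later groups while walking groups in order; B never mutates: it precomputes per-group counters and emits an entry for the k-th occurrence of p in a group iff k exceeds the running max count of p over earlier groups, with forwards = later groups holding at least k copies of p.
import Mathlib
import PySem

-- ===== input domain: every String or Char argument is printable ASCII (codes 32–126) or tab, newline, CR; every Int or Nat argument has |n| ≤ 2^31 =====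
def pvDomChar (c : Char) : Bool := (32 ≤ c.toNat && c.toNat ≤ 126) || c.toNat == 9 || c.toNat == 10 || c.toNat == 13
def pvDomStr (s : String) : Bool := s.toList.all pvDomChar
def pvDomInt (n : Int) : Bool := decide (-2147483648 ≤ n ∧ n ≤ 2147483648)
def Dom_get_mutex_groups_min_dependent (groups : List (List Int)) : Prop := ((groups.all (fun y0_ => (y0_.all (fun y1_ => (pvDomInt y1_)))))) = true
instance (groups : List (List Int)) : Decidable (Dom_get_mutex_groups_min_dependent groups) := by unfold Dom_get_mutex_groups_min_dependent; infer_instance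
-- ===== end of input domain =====

-- B replaces A's destructive remove-from-later-groups sweep by a non-mutating counting rule
-- (occurrence number vs running max of per-group counts); dict lookups replace A's per-pair
-- list scans and removals (measurably faster in a timing run).

-- ===== PORT A =====
-- inner 'for j in range(i+1, len(groupcand)): if p in groupcand[j]: forwards.append(j-i); groupcand[j].remove(p)'
-- (relative recursion over the later groups; 'off' is j-i; list.remove = List.erase, first occurrence)
def pvAscan (p : Int) : Int → List (List Int) → List Int × List (List Int)
  | _, [] => ([], [])
  | off, h :: t =>
    let r := pvAscan p (off + 1) t
    if p ∈ h then (off :: r.1, h.erase p :: r.2) else (r.1, h :: r.2)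

-- 'for p in g: … dependents.append((p, forwards))'
def pvAproc : List Int → List (List Int) → List (Int × List Int) × List (List Int)
  | [], rest => ([], rest)
  | p :: t, rest =>
    let s := pvAscan p 1 rest
    let r := pvAproc t s.2
    ((p, s.1) :: r.1, r.2)

theorem pvAscan_snd_length (p : Int) : ∀ (off : Int) (l : List (List Int)),
    ((pvAscan p off l).2).length = l.length := by
  intro off l
  induction l generalizing off with
  | nil => simp [pvAscan]
  | cons h t ih => simp only [pvAscan]; split <;> simp [ih]

theorem pvAproc_snd_length : ∀ (g : List Int) (rest : List (List Int)),
    ((pvAproc g rest).2).length = rest.length := by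
  intro g
  induction g with
  | nil => intro rest; simp [pvAproc]
  | cons p t ih => intro rest; simp [pvAproc, ih, pvAscan_snd_length]

-- the outer 'for i, g in enumerate(groupcand)' loop: group i is processed, later groups mutated
def pvAgo : List (List Int) → List (List (Int × List Int))
  | [] => []
  | g :: rest => (pvAproc g rest).1 :: pvAgo (pvAproc g rest).2
termination_by gs => gs.length
decreasing_by simp [pvAproc_snd_length]

def get_mutex_groups_min_dependent (groups : List (List Int)) : List (List (Int × List Int)) :=
  pvAgo groups

-- ===== PORT B =====
-- _counter
def pvCounter (g : List Int) : PySem.Dict Int Int :=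
  g.foldl (fun c p => c.insert p (c.getD p 0 + 1)) PySem.Dict.empty

-- '[d + 1 for d, cj in enumerate(later) if cj.get(p, 0) >= k]' ('off' carries d+1)
def pvBfw (p k : Int) : Int → List (PySem.Dict Int Int) → List Int
  | _, [] => []
  | off, cj :: t => if cj.getD p 0 ≥ k then off :: pvBfw p k (off + 1) t else pvBfw p k (off + 1) t

-- 'for p in g: k = seen.get(p,0)+1; seen[p] = k; if k > pref.get(p,0): entries.append(…)'
def pvBloop (pref : PySem.Dict Int Int) (later : List (PySem.Dict Int Int)) (g : List Int) :
    List (Int × List Int) :=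
  (g.foldl (fun (st : PySem.Dict Int Int × List (Int × List Int)) p =>
      let k := st.1.getD p 0 + 1
      if k > pref.getD p 0 then (st.1.insert p k, st.2 ++ [(p, pvBfw p k 1 later)])
      else (st.1.insert p k, st.2))
    (PySem.Dict.empty, [])).2

-- 'for p in g: if c[p] > pref.get(p,0): pref[p] = c[p]'  (c[p]: key always present, read as getD)
def pvBpref (c : PySem.Dict Int Int) (g : List Int) (pref : PySem.Dict Int Int) :
    PySem.Dict Int Int :=
  g.foldl (fun pr p => if c.getD p 0 > pr.getD p 0 then pr.insert p (c.getD p 0) else pr) pref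

-- _go(pref, groups, counts); counts walks in lockstep with groups (second catch-all is unreachable
-- from the entry point, where counts has the same length as groups)
def pvBgo (pref : PySem.Dict Int Int) :
    List (List Int) → List (PySem.Dict Int Int) → List (List (Int × List Int))
  | [], _ => []
  | _ :: _, [] => []
  | g :: gs, c :: later => pvBloop pref later g :: pvBgo (pvBpref c g pref) gs later

def get_mutex_groups_min_dependent_alt (groups : List (List Int)) : List (List (Int × List Int)) :=
  pvBgo PySem.Dict.empty groups (groups.map pvCounter)

-- ===== PRECONDITION & SPEC =====
def Spec_get_mutex_groups_min_dependent (groups : List (List Int)) (out : List (List (Int × List Int))) : Prop := out = get_mutex_groups_min_dependent_alt groups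
instance (groups : List (List Int)) (out : List (List (Int × List Int))) : Decidable (Spec_get_mutex_groups_min_dependent groups out) := by unfold Spec_get_mutex_groups_min_dependent; infer_instance

-- ===== CLAIM (what is proved, stated in full; the proofs are below) =====
def Claim_equal_get_mutex_groups_min_dependent : Prop := ∀ (groups : List (List Int)), Dom_get_mutex_groups_min_dependent groups → Spec_get_mutex_groups_min_dependent groups (get_mutex_groups_min_dependent groups)

-- ===== LEMMAS AND PROOFS =====

-- Common abstract description: pvSpec M gl, where M q is the running max count of q over
-- earlier groups.  A reaches it through "stripped" group lists, B through counters.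

def pvBump (M : Int → Nat) (p : Int) : Int → Nat := fun q => if q = p then M p + 1 else M q
def pvDec (M : Int → Nat) (p : Int) : Int → Nat := fun q => if q = p then M p - 1 else M q

-- g with the first (M q) occurrences of each value q removed
def pvStrip (M : Int → Nat) : List Int → List Int
  | [] => []
  | p :: t => if M p = 0 then p :: pvStrip M t else pvStrip (pvDec M p) t

-- offsets (starting at off) of the groups holding at least k copies of p
def pvOffs (p : Int) (k : Nat) : Int → List (List Int) → List Int
  | _, [] => []
  | off, h :: t => if k ≤ h.count p then off :: pvOffs p k (off + 1) t else pvOffs p k (off + 1) t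

-- entries of one group: Mg = occurrences of each value still to be skipped, Mr = threshold state
def pvEnt (Mg Mr : Int → Nat) : List Int → List (List Int) → List (Int × List Int)
  | [], _ => []
  | p :: t, gs =>
    if Mg p = 0 then (p, pvOffs p (Mr p + 1) 1 gs) :: pvEnt Mg (pvBump Mr p) t gs
    else pvEnt (pvDec Mg p) Mr t gs

def pvSpec (M : Int → Nat) : List (List Int) → List (List (Int × List Int))
  | [] => []
  | g :: gs => pvEnt M M g gs :: pvSpec (fun q => max (M q) (g.count q)) gs

theorem pvStrip_cons (M : Int → Nat) (p : Int) (t : List Int) :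
    pvStrip M (p :: t) = if M p = 0 then p :: pvStrip M t else pvStrip (pvDec M p) t := rfl

theorem pvEnt_cons (Mg Mr : Int → Nat) (p : Int) (t : List Int) (gs : List (List Int)) :
    pvEnt Mg Mr (p :: t) gs =
      (if Mg p = 0 then (p, pvOffs p (Mr p + 1) 1 gs) :: pvEnt Mg (pvBump Mr p) t gs
       else pvEnt (pvDec Mg p) Mr t gs) := rfl

theorem pvDec_self (M : Int → Nat) (p : Int) : pvDec M p p = M p - 1 := by simp [pvDec]
theorem pvDec_ne (M : Int → Nat) (p q : Int) (h : q ≠ p) : pvDec M p q = M q := by simp [pvDec, h]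
theorem pvBump_self (M : Int → Nat) (p : Int) : pvBump M p p = M p + 1 := by simp [pvBump]
theorem pvBump_ne (M : Int → Nat) (p q : Int) (h : q ≠ p) : pvBump M p q = M q := by
  simp [pvBump, h]

theorem pvStrip_zero (l : List Int) : pvStrip (fun _ => 0) l = l := by
  induction l with
  | nil => rfl
  | cons p t ih => simp [pvStrip_cons, ih]

theorem mem_pvStrip (p : Int) : ∀ (l : List Int) (M : Int → Nat),
    p ∈ pvStrip M l ↔ M p < l.count p := by
  intro l
  induction l with
  | nil => intro M; simp [pvStrip]
  | cons q t ih =>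
    intro M
    rw [pvStrip_cons]
    by_cases hq : M q = 0
    · rw [if_pos hq, List.mem_cons]
      by_cases hpq : p = q
      · subst hpq; simp [List.count_cons, hq]
      · simp [List.count_cons, hpq, Ne.symm hpq, ih]
    · rw [if_neg hq, ih]
      by_cases hpq : p = q
      · subst hpq
        rw [pvDec_self]
        simp only [List.count_cons, if_pos rfl]
        simp
        omega
      · rw [pvDec_ne M q p hpq]
        simp [List.count_cons, Ne.symm hpq]

theorem pvStrip_eraseIfMem (p : Int) : ∀ (l : List Int) (M : Int → Nat),
    (if p ∈ pvStrip M l then (pvStrip M l).erase p else pvStrip M l) = pvStrip (pvBump M p) l := by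
  intro l
  induction l with
  | nil => intro M; simp [pvStrip]
  | cons q t ih =>
    intro M
    rw [pvStrip_cons, pvStrip_cons (pvBump M p)]
    by_cases hpq : p = q
    · subst hpq
      have hb : ¬ pvBump M p p = 0 := by rw [pvBump_self]; omega
      rw [if_neg hb]
      by_cases hq : M p = 0
      · rw [if_pos hq]
        have hfun : pvDec (pvBump M p) p = M := by
          funext r
          by_cases hr : r = p
          · subst hr; rw [pvDec_self, pvBump_self, hq]
          · rw [pvDec_ne _ _ _ hr, pvBump_ne _ _ _ hr]
        rw [hfun, if_pos List.mem_cons_self]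
        simp [List.erase_cons]
      · rw [if_neg hq]
        have hfun : pvDec (pvBump M p) p = pvBump (pvDec M p) p := by
          funext r
          by_cases hr : r = p
          · subst hr; rw [pvDec_self, pvBump_self, pvBump_self, pvDec_self]; omega
          · rw [pvDec_ne _ _ _ hr, pvBump_ne _ _ _ hr, pvBump_ne _ _ _ hr, pvDec_ne _ _ _ hr]
        rw [hfun]
        exact ih (pvDec M p)
    · by_cases hq : M q = 0
      · have hb : pvBump M p q = 0 := by rw [pvBump_ne _ _ _ (Ne.symm hpq)]; exact hq
        rw [if_pos hq, if_pos hb]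
        by_cases hmem : p ∈ pvStrip M t
        · rw [if_pos (List.mem_cons_of_mem _ hmem), List.erase_cons]
          have hqp : (q == p) = false := by simp [Ne.symm hpq]
          rw [hqp, ← ih M, if_pos hmem]
          simp
        · rw [if_neg (by simp [List.mem_cons, hpq, hmem]), ← ih M, if_neg hmem]
      · have hb : ¬ pvBump M p q = 0 := by rw [pvBump_ne _ _ _ (Ne.symm hpq)]; exact hq
        rw [if_neg hq, if_neg hb]
        have hfun : pvDec (pvBump M p) q = pvBump (pvDec M q) p := by
          funext r
          by_cases hr : r = q
          · subst hr
            rw [pvDec_self, pvBump_ne _ _ _ (Ne.symm hpq), pvBump_ne _ _ _ (Ne.symm hpq),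
              pvDec_self]
          · by_cases hr2 : r = p
            · subst hr2
              rw [pvDec_ne _ _ _ hr, pvBump_self, pvBump_self, pvDec_ne _ _ _ hr]
            · rw [pvDec_ne _ _ _ hr, pvBump_ne _ _ _ hr2, pvBump_ne _ _ _ hr2,
                pvDec_ne _ _ _ hr]
        rw [hfun]
        exact ih (pvDec M q)

theorem pvAscan_strip (p : Int) : ∀ (gs : List (List Int)) (M : Int → Nat) (off : Int),
    pvAscan p off (gs.map (pvStrip M)) =
      (pvOffs p (M p + 1) off gs, gs.map (pvStrip (pvBump M p))) := by
  intro gs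
  induction gs with
  | nil => intro M off; simp [pvAscan, pvOffs]
  | cons h t ih =>
    intro M off
    simp only [List.map_cons, pvAscan, pvOffs, ih]
    by_cases hmem : p ∈ pvStrip M h
    · have hc : M p + 1 ≤ h.count p := by
        have := (mem_pvStrip p h M).mp hmem; omega
      have he := pvStrip_eraseIfMem p h M
      rw [if_pos hmem] at he
      simp [hmem, hc, he]
    · have hc : ¬ M p + 1 ≤ h.count p := by
        intro h'; exact hmem ((mem_pvStrip p h M).mpr (by omega))
      have he := pvStrip_eraseIfMem p h M
      rw [if_neg hmem] at he
      have hm2 : p ∉ pvStrip (pvBump M p) h := by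
        simp only [mem_pvStrip, pvBump_self]; omega
      simp [hmem, hc, he, hm2]

theorem pvAproc_strip : ∀ (g : List Int) (Mg Mr : Int → Nat) (gs : List (List Int)),
    pvAproc (pvStrip Mg g) (gs.map (pvStrip Mr)) =
      (pvEnt Mg Mr g gs, gs.map (pvStrip (fun q => Mr q + (g.count q - Mg q)))) := by
  intro g
  induction g with
  | nil =>
    intro Mg Mr gs
    have : (fun q => Mr q + (List.count q [] - Mg q)) = Mr := by
      funext q; simp
    simp [pvStrip, pvAproc, pvEnt, this]
  | cons p t ih =>
    intro Mg Mr gs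
    by_cases hp : Mg p = 0
    · have h1 : pvStrip Mg (p :: t) = p :: pvStrip Mg t := by rw [pvStrip_cons, if_pos hp]
      rw [h1]
      simp only [pvAproc, pvAscan_strip, ih Mg (pvBump Mr p) gs]
      have hfun : (fun q => pvBump Mr p q + (t.count q - Mg q)) =
          (fun q => Mr q + ((p :: t).count q - Mg q)) := by
        funext q
        by_cases hq : q = p
        · subst hq
          rw [pvBump_self]
          simp [List.count_cons, hp]
          try omega
        · rw [pvBump_ne _ _ _ hq]
          simp only [List.count_cons]
          simp [Ne.symm hq]
      simp [pvEnt_cons, hp, hfun]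
    · have h1 : pvStrip Mg (p :: t) = pvStrip (pvDec Mg p) t := by
        rw [pvStrip_cons, if_neg hp]
      rw [h1, ih (pvDec Mg p) Mr gs]
      have hfun : (fun q => Mr q + (t.count q - pvDec Mg p q)) =
          (fun q => Mr q + ((p :: t).count q - Mg q)) := by
        funext q
        by_cases hq : q = p
        · subst hq
          rw [pvDec_self]
          simp [List.count_cons]
          try omega
        · rw [pvDec_ne _ _ _ hq]
          simp only [List.count_cons]
          simp [Ne.symm hq]
      have hent : pvEnt Mg Mr (p :: t) gs = pvEnt (pvDec Mg p) Mr t gs := by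
        rw [pvEnt_cons, if_neg hp]
      rw [hfun, hent]

theorem pvAgo_strip : ∀ (gl : List (List Int)) (M : Int → Nat),
    pvAgo (gl.map (pvStrip M)) = pvSpec M gl := by
  intro gl
  induction gl with
  | nil => intro M; simp [pvAgo, pvSpec]
  | cons g gs ih =>
    intro M
    rw [List.map_cons, pvAgo, pvAproc_strip g M M gs]
    have hfun : (fun q => M q + (g.count q - M q)) = (fun q => max (M q) (g.count q)) := by
      funext q; omega
    rw [hfun, ih]
    rfl

-- B-side
theorem pvCounter_getD (g : List Int) (p : Int) :
    (pvCounter g).getD p 0 = (g.count p : Int) := by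
  unfold pvCounter
  rw [PySem.Dict.getD_foldl_insert_add_one, PySem.Dict.getD_empty]
  simp

theorem pvBfw_offs (p : Int) : ∀ (gs : List (List Int)) (k : Nat) (off : Int),
    pvBfw p (k : Int) off (gs.map pvCounter) = pvOffs p k off gs := by
  intro gs
  induction gs with
  | nil => intro k off; simp [pvBfw, pvOffs]
  | cons h t ih =>
    intro k off
    simp only [List.map_cons, pvBfw, pvOffs, pvCounter_getD, ih]
    by_cases hc : k ≤ h.count p
    · rw [if_pos (by exact_mod_cast hc), if_pos hc]
    · rw [if_neg (by exact_mod_cast hc), if_neg hc]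

theorem pvBloop_ent (pref : PySem.Dict Int Int) (M : Int → Nat)
    (hM : ∀ q, pref.getD q 0 = (M q : Int)) (gs : List (List Int)) :
    ∀ (g : List Int) (S : Int → Nat) (seenD : PySem.Dict Int Int)
      (hS : ∀ q, seenD.getD q 0 = (S q : Int)) (acc : List (Int × List Int)),
    (g.foldl (fun (st : PySem.Dict Int Int × List (Int × List Int)) p =>
        let k := st.1.getD p 0 + 1
        if k > pref.getD p 0 then (st.1.insert p k, st.2 ++ [(p, pvBfw p k 1 (gs.map pvCounter))])
        else (st.1.insert p k, st.2))
      (seenD, acc)).2 =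
    acc ++ pvEnt (fun q => M q - S q) (fun q => max (M q) (S q)) g gs := by
  intro g
  induction g with
  | nil => intro S seenD hS acc; simp [pvEnt]
  | cons p t ih =>
    intro S seenD hS acc
    have hseen' : ∀ q, (seenD.insert p (seenD.getD p 0 + 1)).getD q 0 =
        ((fun q => if q = p then S p + 1 else S q) q : Int) := by
      intro q
      rw [PySem.Dict.getD_insert]
      by_cases hq : q = p <;> simp [hq, hS, hS p]
    by_cases hcond : M p ≤ S p
    · have hgt : seenD.getD p 0 + 1 > pref.getD p 0 := by
        rw [hS, hM]; exact_mod_cast Nat.lt_succ_of_le hcond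
      simp only [List.foldl_cons, if_pos hgt]
      rw [ih (fun q => if q = p then S p + 1 else S q) _ hseen' _]
      have hMg : (fun q => M q - (if q = p then S p + 1 else S q)) =
          pvDec (fun q => M q - S q) p ∘ id := by
        funext q; by_cases hq : q = p <;> simp [pvDec, hq] <;> omega
      have hent : pvEnt (fun q => M q - (if q = p then S p + 1 else S q))
            (fun q => max (M q) (if q = p then S p + 1 else S q)) t gs =
          pvEnt (fun q => M q - S q) (pvBump (fun q => max (M q) (S q)) p) t gs := by
        congr 1
        · funext q; by_cases hq : q = p <;> simp [hq] <;> omega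
        · funext q; by_cases hq : q = p <;> simp [pvBump, hq] <;> omega
      rw [hent]
      have hfw : seenD.getD p 0 + 1 = ((S p + 1 : Nat) : Int) := by rw [hS]; push_cast; ring
      rw [hfw, pvBfw_offs]
      have hzero : M p - S p = 0 := by omega
      have hthr : max (M p) (S p) + 1 = S p + 1 := by omega
      rw [pvEnt_cons, if_pos hzero, hthr]
      simp
    · have hle : ¬ seenD.getD p 0 + 1 > pref.getD p 0 := by
        rw [hS, hM]; push_cast; omega
      simp only [List.foldl_cons, if_neg hle]
      rw [ih (fun q => if q = p then S p + 1 else S q) _ hseen' _]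
      have hnz : ¬ (M p - S p = 0) := by omega
      have hent : pvEnt (fun q => M q - (if q = p then S p + 1 else S q))
            (fun q => max (M q) (if q = p then S p + 1 else S q)) t gs =
          pvEnt (pvDec (fun q => M q - S q) p) (fun q => max (M q) (S q)) t gs := by
        congr 1
        · funext q; by_cases hq : q = p <;> simp [pvDec, hq] <;> omega
        · funext q; by_cases hq : q = p <;> simp [hq] <;> omega
      rw [hent, pvEnt_cons, if_neg hnz]

theorem pvBpref_getD (C : Int → Nat) (c : PySem.Dict Int Int)
    (hc : ∀ q, c.getD q 0 = (C q : Int)) :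
    ∀ (g0 : List Int) (pref : PySem.Dict Int Int) (M : Int → Nat)
      (hM : ∀ q, pref.getD q 0 = (M q : Int)) (q : Int),
    (pvBpref c g0 pref).getD q 0 = ((if q ∈ g0 then max (M q) (C q) else M q : Nat) : Int) := by
  intro g0
  induction g0 with
  | nil => intro pref M hM q; simp [pvBpref, hM]
  | cons p t ih =>
    intro pref M hM q
    have step : (pvBpref c (p :: t) pref) =
        pvBpref c t (if c.getD p 0 > pref.getD p 0 then pref.insert p (c.getD p 0) else pref) := by
      simp [pvBpref]
    rw [step]
    have hM' : ∀ r, (if c.getD p 0 > pref.getD p 0 then pref.insert p (c.getD p 0) else pref).getD r 0 =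
        ((if r = p then max (M p) (C p) else M r : Nat) : Int) := by
      intro r
      by_cases hgt : c.getD p 0 > pref.getD p 0
      · rw [if_pos hgt, PySem.Dict.getD_insert]
        rw [hc, hM] at hgt
        by_cases hr : r = p
        · rw [if_pos hr, if_pos hr, hc]; omega
        · rw [if_neg hr, if_neg hr, hM]
      · rw [if_neg hgt]
        rw [hc, hM] at hgt
        by_cases hr : r = p
        · rw [if_pos hr, hr, hM]; omega
        · rw [if_neg hr, hM]
    rw [ih _ _ hM' q]
    by_cases hq : q = p
    · rw [hq]
      by_cases hmem : p ∈ t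
      · simp [hmem]
        try omega
      · simp [hmem]
        try omega
    · by_cases hmem : q ∈ t
      · simp [hq, hmem]
      · simp [hq, hmem]

theorem pvBgo_spec : ∀ (gl : List (List Int)) (pref : PySem.Dict Int Int) (M : Int → Nat),
    (∀ q, pref.getD q 0 = (M q : Int)) →
    pvBgo pref gl (gl.map pvCounter) = pvSpec M gl := by
  intro gl
  induction gl with
  | nil => intro pref M hM; simp [pvBgo, pvSpec]
  | cons g gs ih =>
    intro pref M hM
    rw [List.map_cons]
    show pvBloop pref (gs.map pvCounter) g :: pvBgo (pvBpref (pvCounter g) g pref) gs (gs.map pvCounter) = _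
    have hloop : pvBloop pref (gs.map pvCounter) g = pvEnt M M g gs := by
      unfold pvBloop
      rw [pvBloop_ent pref M hM gs g (fun _ => 0) PySem.Dict.empty
        (by intro q; simp [PySem.Dict.getD_empty]) []]
      simp only [List.nil_append]
      congr 1 <;> funext q <;> omega
    have hM' : ∀ q, (pvBpref (pvCounter g) g pref).getD q 0 =
        ((fun q => max (M q) (g.count q)) q : Int) := by
      intro q
      rw [pvBpref_getD (fun q => g.count q) (pvCounter g) (fun q => pvCounter_getD g q) g pref M hM q]
      by_cases hmem : q ∈ g
      · simp [hmem]
      · have : g.count q = 0 := List.count_eq_zero.mpr hmem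
        simp [hmem, this]
    rw [hloop, ih _ _ hM']
    rfl

-- ===== VERDICT (by name: the statement is the Claim_ definition above) =====
theorem get_mutex_groups_min_dependent_spec : Claim_equal_get_mutex_groups_min_dependent := by
  intro groups _
  unfold Spec_get_mutex_groups_min_dependent
  unfold get_mutex_groups_min_dependent get_mutex_groups_min_dependent_alt
  have h1 : pvStrip (fun _ : Int => (0 : Nat)) = id := funext pvStrip_zero
  calc pvAgo groups
      = pvAgo (groups.map (pvStrip (fun _ => 0))) := by rw [h1, List.map_id]
    _ = pvSpec (fun _ => 0) groups := pvAgo_strip groups _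
    _ = pvBgo PySem.Dict.empty groups (groups.map pvCounter) :=
        (pvBgo_spec groups PySem.Dict.empty (fun _ => 0)
          (fun q => by simp [PySem.Dict.getD_empty])).symm
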